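-- pv_equiv track=rewrite | github.com/luornor/A2SV | contest_4/E_Fall_Down.py | simulate_fall
-- ===== SOURCE A (Python) =====
-- def simulate_fall(grid):
--     rows,cols = len(grid), len(grid[0])
--     # occupied = [[False]*cols for _ in range(rows)]
--     # move through each column from left to right
--     for c in range(cols):
--         #move through each row from buttom to top except last row
--         for r in range(rows-1,-1,-1):
--             #if we find a stone
--             #we loop through the column from buttom to top row
--             # and let the stone fall
--             for i in range(rows-2,-1,-1):
--                 while grid[i][c] == '*' and grid[i+1][c]=='.':
--                     grid[i][c]= '.'
--                     grid[i+1][c]='*'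
--
--     return grid
-- ===== SOURCE B (Python) =====
-- def _settle(col):
--     # rebuild one column top-to-bottom: within each maximal run of '.'/'*'
--     # cells (delimited by obstacles), all dots go on top and all stones on
--     # the bottom; obstacle cells stay where they are.
--     out, dots, stars = [], 0, 0
--     for cell in col:
--         if cell == '.':
--             dots += 1
--         elif cell == '*':
--             stars += 1
--         else:
--             out += ['.'] * dots + ['*'] * stars + [cell]
--             dots = stars = 0
--     return out + ['.'] * dots + ['*'] * stars
--
--
-- def simulate_fall(grid):
--     cols = len(grid[0])
--     for c in range(cols):
--         new_col = _settle([row[c] for row in grid])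
--         for r in range(len(grid)):
--             grid[r][c] = new_col[r]
--     return grid
-- ===== Notes on version B (the rewrite author's own statement) =====
-- stated objective: faster
-- what changed: A relaxes each column with rows x rows bottom-up adjacent-swap sweeps; B rebuilds each column in one linear pass, counting dots and stones per obstacle-delimited segment and emitting dots above stones.
-- outside the precondition, e.g. on simulate_fall([['.'], []]): A returns [['.'], []], B raises IndexError
import Mathlib
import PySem

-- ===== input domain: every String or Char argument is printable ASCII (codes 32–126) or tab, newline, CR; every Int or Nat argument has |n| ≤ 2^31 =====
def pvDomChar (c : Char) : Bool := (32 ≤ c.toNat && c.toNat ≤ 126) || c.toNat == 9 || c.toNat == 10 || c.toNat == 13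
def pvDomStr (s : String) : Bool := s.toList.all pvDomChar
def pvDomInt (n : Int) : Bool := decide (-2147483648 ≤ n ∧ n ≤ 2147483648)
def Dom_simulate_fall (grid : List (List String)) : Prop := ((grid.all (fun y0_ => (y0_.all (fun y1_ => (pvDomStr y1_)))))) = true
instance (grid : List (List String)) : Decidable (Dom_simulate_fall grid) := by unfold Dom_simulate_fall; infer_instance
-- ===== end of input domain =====

-- B replaces A's repeated relaxation sweeps (rows·rows adjacent-swap passes per column)
-- by one segment-counting rebuild per column — asymptotically faster; both mutate the
-- grid in place in Python and end in the same final state, the claim is about the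
-- returned value.

-- ===== PORT A =====
-- grid[i][c] (both indices here are always nonnegative and, under Pre_, in range)
def pvCell (g : List (List String)) (i c : Int) : Option String :=
  match PySem.List.pyGet? g i with
  | some row => PySem.List.pyGet? row c
  | none => none

-- grid[i][c] = v
def pvSetCell (g : List (List String)) (i c : Int) (v : String) : List (List String) :=
  PySem.List.pySetD g i (PySem.List.pySetD (PySem.List.pyGetD g i []) c v)

-- body of 'for i in …': the while's body falsifies its own guard (grid[i][c] becomes '.'),
-- so the while runs at most once and is an 'if'
def pvDropOnce (g : List (List String)) (c i : Int) : List (List String) :=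
  if pvCell g i c = some "*" ∧ pvCell g (i + 1) c = some "." then
    pvSetCell (pvSetCell g i c ".") (i + 1) c "*"
  else g

def simulate_fall (grid : List (List String)) : List (List String) :=
  let rows : Int := grid.length
  let cols : Int := (grid.headD []).length  -- len(grid[0]); grid = [] raises and is outside Pre_
  (PySem.List.pyRange 0 cols 1).foldl (fun g c =>
    (PySem.List.pyRange (rows - 1) (-1) (-1)).foldl (fun g _r =>
      (PySem.List.pyRange (rows - 2) (-1) (-1)).foldl (fun g i =>
        pvDropOnce g c i) g) g) grid

-- ===== PORT B =====
-- _settle: rebuild one column; per maximal '.'/'*' run, dots above stones; obstacles stay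
def pvSettle (col : List String) : List String :=
  let acc := col.foldl (fun (acc : List String × Nat × Nat) cell =>
      if cell == "." then (acc.1, acc.2.1 + 1, acc.2.2)
      else if cell == "*" then (acc.1, acc.2.1, acc.2.2 + 1)
      else (acc.1 ++ List.replicate acc.2.1 "." ++ List.replicate acc.2.2 "*" ++ [cell], 0, 0))
    ([], 0, 0)
  acc.1 ++ List.replicate acc.2.1 "." ++ List.replicate acc.2.2 "*"

def simulate_fall_alt (grid : List (List String)) : List (List String) :=
  let cols : Int := (grid.headD []).length  -- len(grid[0]); grid = [] raises and is outside Pre_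
  (PySem.List.pyRange 0 cols 1).foldl (fun g c =>
    let newCol := pvSettle (g.map (fun row => PySem.List.pyGetD row c ""))
    (PySem.List.pyRange 0 (g.length : Int) 1).foldl (fun g2 r =>
      pvSetCell g2 r c (PySem.List.pyGetD newCol r "")) g) grid

-- ===== PRECONDITION & SPEC =====
-- Pre_ excludes the empty grid (A raises IndexError on len(grid[0])) and ragged grids with a
-- row shorter than the first row: on those A raises IndexError except in degenerate cases where
-- no comparison ever probes a missing cell (then A returns), and B raises IndexError there.
def Pre_simulate_fall (grid : List (List String)) : Prop :=
  grid ≠ [] ∧ ∀ row ∈ grid, (grid.headD []).length ≤ row.length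
instance (grid : List (List String)) : Decidable (Pre_simulate_fall grid) := by
  unfold Pre_simulate_fall; infer_instance

def pvWitness_simulate_fall : List (List String) := [["*", "."], [".", "#"], [".", "*"]]

def Spec_simulate_fall (grid : List (List String)) (out : List (List String)) : Prop := out = simulate_fall_alt grid
instance (grid : List (List String)) (out : List (List String)) : Decidable (Spec_simulate_fall grid out) := by unfold Spec_simulate_fall; infer_instance

-- ===== CLAIM (what is proved, stated in full; the proofs are below) =====
def Claim_equal_simulate_fall : Prop := ∀ (grid : List (List String)), Dom_simulate_fall grid → Pre_simulate_fall grid → Spec_simulate_fall grid (simulate_fall grid)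

-- ===== LEMMAS AND PROOFS =====

-- ---- proof-layer notions: a column as a list, writing a column back ----
def colOf (g : List (List String)) (c : Nat) : List String := g.map (fun row => row.getD c "")

def wcol (c : Nat) (g : List (List String)) (u : List String) : List (List String) :=
  List.zipWith (fun row x => row.set c x) g u

-- one adjacent fall step at index i of a column
def swapN (u : List String) (i : Nat) : List String :=
  if u[i]? = some "*" ∧ u[i + 1]? = some "." then (u.set i ".").set (i + 1) "*" else u

-- one bottom-up sweep (indices len-2 … 0), structurally
def passRec : List String → List String
  | [] => []
  | x :: xs =>
    let ys := passRec xs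
    if x = "*" ∧ ys.head? = some "." then "." :: "*" :: ys.tail else x :: ys

-- insert one stone below the leading dots
def pushStar : List String → List String
  | [] => ["*"]
  | y :: t => if y = "." then "." :: pushStar t else "*" :: y :: t

-- the settled column, structurally
def settleL : List String → List String
  | [] => []
  | x :: xs => if x = "*" then pushStar (settleL xs) else x :: settleL xs

-- does the leading free run ('.'/'*' cells before the first obstacle) contain a dot?
def hasDot : List String → Bool
  | [] => false
  | x :: xs => if x = "." then true else if x = "*" then hasDot xs else false

theorem length_pushStar (w : List String) : (pushStar w).length = w.length + 1 := by
  induction w with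
  | nil => simp [pushStar]
  | cons y t ih => simp only [pushStar]; split <;> simp [ih]

theorem length_settleL (v : List String) : (settleL v).length = v.length := by
  induction v with
  | nil => rfl
  | cons x xs ih => simp only [settleL]; split <;> simp [length_pushStar, ih]

theorem length_passRec (v : List String) : (passRec v).length = v.length := by
  induction v with
  | nil => rfl
  | cons x xs ih =>
    simp only [passRec]
    split
    · rename_i h
      obtain ⟨-, h2⟩ := h
      cases hys : passRec xs with
      | nil => rw [hys] at h2; simp at h2
      | cons y t => rw [hys] at ih; simp at ih ⊢; omega
    · simp [ih]

theorem head?_passRec (v : List String) : ((passRec v).head? = some ".") ↔ hasDot v = true := by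
  induction v with
  | nil => simp [passRec, hasDot]
  | cons x xs ih =>
    simp only [passRec]
    split
    · rename_i h
      obtain ⟨hx, h2⟩ := h
      subst hx
      simp [hasDot, ih.mp h2]
    · rename_i h
      by_cases hx : x = "."
      · subst hx; simp [hasDot]
      · by_cases hs : x = "*"
        · subst hs
          have h2 : ¬(passRec xs).head? = some "." := fun hh => h ⟨rfl, hh⟩
          have hd : hasDot xs = false := by
            cases hdd : hasDot xs with
            | false => rfl
            | true => exact absurd (ih.mpr hdd) h2
          simp [hasDot, hd]
        · simp [hasDot, hx, hs]

theorem hasDot_passRec (v : List String) : hasDot (passRec v) = hasDot v := by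
  induction v with
  | nil => rfl
  | cons x xs ih =>
    simp only [passRec]
    split
    · rename_i h
      have hd : hasDot xs = true := (head?_passRec xs).mp h.2
      simp [hasDot, h.1, hd]
    · rename_i h
      by_cases hx : x = "."
      · simp [hasDot, hx]
      · by_cases hs : x = "*"
        · simp [hasDot, hs, ih]
        · simp [hasDot, hx, hs]

theorem settleL_passRec (v : List String) : settleL (passRec v) = settleL v := by
  induction v with
  | nil => rfl
  | cons x xs ih =>
    simp only [passRec]
    split
    · rename_i h
      obtain ⟨hx, h2⟩ := h
      cases hys : passRec xs with
      | nil => rw [hys] at h2; simp at h2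
      | cons y t =>
        rw [hys] at h2; simp at h2
        subst h2
        rw [hys] at ih
        subst hx
        show settleL ("." :: "*" :: t) = settleL ("*" :: xs)
        have e1 : settleL ("." :: "*" :: t) = "." :: pushStar (settleL t) := by
          simp [settleL]
        have e2 : settleL ("." :: t) = "." :: settleL t := by simp [settleL]
        rw [e1]
        show _ = pushStar (settleL xs)
        rw [← ih, e2]
        simp [pushStar]
    · rename_i h
      by_cases hs : x = "*"
      · subst hs
        show settleL ("*" :: passRec xs) = settleL ("*" :: xs)
        simp [settleL, ih]
      · show settleL (x :: passRec xs) = settleL (x :: xs)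
        simp [settleL, hs, ih]

theorem head?_settleL_of_not_hasDot (v : List String) (h : hasDot v = false) :
    (settleL v).head? ≠ some "." := by
  induction v with
  | nil => simp [settleL]
  | cons x xs ih =>
    simp only [hasDot] at h
    by_cases hx : x = "."
    · simp [hx] at h
    · by_cases hs : x = "*"
      · rw [if_neg hx, if_pos hs] at h
        subst hs
        have := ih h
        simp only [settleL]
        cases hw : settleL xs with
        | nil => simp [pushStar]
        | cons y t =>
          rw [hw] at this; simp at this
          simp [pushStar, this]
      · simp [settleL, hs, hx]

-- head is 'frozen': not a stone with a dot somewhere below it in its run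
def Fr (v : List String) : Prop := v.head? = some "*" → hasDot v = false

theorem Fr_passRec (v : List String) : Fr (passRec v) := by
  intro hh
  rw [hasDot_passRec]
  cases hd : hasDot v with
  | false => rfl
  | true =>
    have := (head?_passRec v).mpr hd
    rw [this] at hh; simp at hh

theorem passRec_cons_of_Fr (x : String) (xs : List String) (h : Fr (x :: xs)) :
    passRec (x :: xs) = x :: passRec xs := by
  simp only [passRec]
  split
  · rename_i hc
    obtain ⟨hx, h2⟩ := hc
    have hd : hasDot xs = true := (head?_passRec xs).mp h2
    have hfalse : hasDot (x :: xs) = false := h (by simp [hx])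
    rw [show hasDot (x :: xs) = hasDot xs from by simp [hasDot, hx]] at hfalse
    rw [hd] at hfalse; cases hfalse
  · rfl

theorem Fr_cons_passRec (x : String) (xs : List String) (h : Fr (x :: xs)) :
    Fr (x :: passRec xs) := by
  intro hh
  have hx : x = "*" := by simpa using hh
  subst hx
  have hd := h (by simp)
  rw [show hasDot ("*" :: xs) = hasDot xs from by simp [hasDot]] at hd
  rw [show hasDot ("*" :: passRec xs) = hasDot (passRec xs) from by simp [hasDot],
    hasDot_passRec]
  exact hd

theorem iterate_passRec_cons (k : Nat) (x : String) (xs : List String) (h : Fr (x :: xs)) :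
    passRec^[k] (x :: xs) = x :: passRec^[k] xs := by
  induction k generalizing xs with
  | zero => rfl
  | succ k ih =>
    rw [Function.iterate_succ_apply, Function.iterate_succ_apply,
      passRec_cons_of_Fr x xs h, ih (passRec xs) (Fr_cons_passRec x xs h)]

theorem settleL_cons_of_Fr (x : String) (xs : List String) (h : Fr (x :: xs)) :
    settleL (x :: xs) = x :: settleL xs := by
  by_cases hs : x = "*"
  · subst hs
    have hd : hasDot xs = false := by
      have := h (by simp)
      rwa [show hasDot ("*" :: xs) = hasDot xs from by simp [hasDot]] at this
    have hne := head?_settleL_of_not_hasDot xs hd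
    simp only [settleL]
    cases hw : settleL xs with
    | nil => simp [pushStar]
    | cons y t =>
      rw [hw] at hne; simp at hne
      simp [pushStar, hne]
  · simp [settleL, hs]

theorem iterate_passRec_settle : ∀ (n : Nat) (v : List String), v.length = n →
    passRec^[n] v = settleL v := by
  intro n
  induction n with
  | zero => intro v hv; rw [List.length_eq_zero_iff] at hv; subst hv; rfl
  | succ n ih =>
    intro v hv
    rw [Function.iterate_succ_apply]
    have hlen : (passRec v).length = n + 1 := by rw [length_passRec]; exact hv
    cases hw : passRec v with
    | nil => rw [hw] at hlen; cases hlen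
    | cons y ys =>
      have hfr : Fr (y :: ys) := by rw [← hw]; exact Fr_passRec v
      rw [iterate_passRec_cons n y ys hfr]
      rw [hw] at hlen; simp at hlen
      rw [ih ys hlen]
      rw [← settleL_cons_of_Fr y ys hfr, ← hw, settleL_passRec]

-- ---- index sweep = structural sweep ----
theorem foldl_map_succ_cons {α : Type} (F G : List α → Nat → List α)
    (hFG : ∀ (w : List α) (i : Nat) (x : α), F (x :: w) (i + 1) = x :: G w i) :
    ∀ (l : List Nat) (x : α) (xs : List α),
      List.foldl F (x :: xs) (l.map (· + 1)) = x :: List.foldl G xs l := by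
  intro l
  induction l with
  | nil => intro x xs; rfl
  | cons i l ih =>
    intro x xs
    simp only [List.map_cons, List.foldl_cons, hFG]
    exact ih x (G xs i)

theorem swapN_cons (w : List String) (i : Nat) (x : String) :
    swapN (x :: w) (i + 1) = x :: swapN w i := by
  simp only [swapN, List.getElem?_cons_succ, List.set_cons_succ]
  split <;> rfl

theorem foldl_swapN_rev (u : List String) :
    List.foldl swapN u ((List.range (u.length - 1)).reverse) = passRec u := by
  induction u with
  | nil => rfl
  | cons x xs ih =>
    cases xs with
    | nil => simp [passRec]
    | cons y t =>
      have e1 : (List.range ((x :: y :: t).length - 1)).reverse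
          = ((List.range t.length).reverse).map (· + 1) ++ [0] := by
        show (List.range (t.length + 1)).reverse = _
        rw [List.range_succ_eq_map, List.reverse_cons,
          show List.map Nat.succ (List.range t.length) = (List.range t.length).map (· + 1) from
            List.map_congr_left (fun a _ => rfl), List.map_reverse]
      rw [e1, List.foldl_append,
        foldl_map_succ_cons swapN swapN (fun w i x => swapN_cons w i x)
          ((List.range t.length).reverse) x (y :: t),
        show (List.range t.length).reverse = (List.range ((y :: t).length - 1)).reverse from by simp,
        ih]
      -- final step at index 0
      simp only [List.foldl_cons, List.foldl_nil]
      rw [show passRec (x :: y :: t)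
          = (if x = "*" ∧ (passRec (y :: t)).head? = some "." then
              "." :: "*" :: (passRec (y :: t)).tail else x :: passRec (y :: t)) from rfl]
      cases hys : passRec (y :: t) with
      | nil => have := length_passRec (y :: t); rw [hys] at this; simp at this
      | cons z zs =>
        simp only [swapN]
        by_cases hc : x = "*" ∧ z = "."
        · obtain ⟨hx, hz⟩ := hc
          subst hx; subst hz
          simp
        · have h1 : ¬((x :: z :: zs)[0]? = some "*" ∧ (x :: z :: zs)[0 + 1]? = some ".") := by
            simp only [List.getElem?_cons_zero, List.getElem?_cons_succ]
            intro hcc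
            exact hc ⟨by simpa using hcc.1, by simpa using hcc.2⟩
          rw [if_neg h1]
          have h2 : ¬(x = "*" ∧ (z :: zs).head? = some ".") := by
            intro hcc
            exact hc ⟨hcc.1, by simpa using hcc.2⟩
          rw [if_neg h2]

-- ---- the accumulator settle (port B's helper) = structural settle ----
theorem pushStar_iterate_dot (s : Nat) (w : List String) :
    pushStar^[s] ("." :: w) = "." :: pushStar^[s] w := by
  induction s generalizing w with
  | zero => rfl
  | succ s ih =>
    rw [Function.iterate_succ_apply, Function.iterate_succ_apply]
    show pushStar^[s] (pushStar ("." :: w)) = "." :: pushStar^[s] (pushStar w)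
    rw [show pushStar ("." :: w) = "." :: pushStar w from by simp [pushStar]]
    exact ih (pushStar w)

theorem pushStar_iterate_of_head_ne (s : Nat) (w : List String) (h : w.head? ≠ some ".") :
    pushStar^[s] w = List.replicate s "*" ++ w := by
  induction s generalizing w with
  | zero => rfl
  | succ s ih =>
    rw [Function.iterate_succ_apply]
    have hps : pushStar w = "*" :: w := by
      cases w with
      | nil => rfl
      | cons y t => simp at h; simp [pushStar, h]
    rw [hps, ih ("*" :: w) (by simp), List.replicate_succ']
    simp

def stepSettle (acc : List String × Nat × Nat) (cell : String) : List String × Nat × Nat :=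
  if cell == "." then (acc.1, acc.2.1 + 1, acc.2.2)
  else if cell == "*" then (acc.1, acc.2.1, acc.2.2 + 1)
  else (acc.1 ++ List.replicate acc.2.1 "." ++ List.replicate acc.2.2 "*" ++ [cell], 0, 0)

def finSettle (acc : List String × Nat × Nat) : List String :=
  acc.1 ++ List.replicate acc.2.1 "." ++ List.replicate acc.2.2 "*"

theorem pvSettle_invariant : ∀ (v : List String) (out : List String) (d s : Nat),
    finSettle (v.foldl stepSettle (out, d, s))
      = out ++ List.replicate d "." ++ pushStar^[s] (settleL v) := by
  intro v
  induction v with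
  | nil =>
    intro out d s
    simp only [List.foldl_nil, settleL, finSettle]
    rw [pushStar_iterate_of_head_ne s [] (by simp)]
    simp
  | cons x t ih =>
    intro out d s
    simp only [List.foldl_cons]
    by_cases hx : x = "."
    · subst hx
      rw [show stepSettle (out, d, s) "." = (out, d + 1, s) from by simp [stepSettle], ih]
      rw [show settleL ("." :: t) = "." :: settleL t from by simp [settleL],
        pushStar_iterate_dot]
      simp [List.replicate_succ', List.append_assoc]
    · by_cases hs : x = "*"
      · subst hs
        rw [show stepSettle (out, d, s) "*" = (out, d, s + 1) from by simp [stepSettle], ih]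
        rw [show settleL ("*" :: t) = pushStar (settleL t) from by simp [settleL],
          ← Function.iterate_succ_apply]
      · rw [show stepSettle (out, d, s) x
            = (out ++ List.replicate d "." ++ List.replicate s "*" ++ [x], 0, 0) from by
              simp [stepSettle, hx, hs], ih]
        rw [show settleL (x :: t) = x :: settleL t from by simp [settleL, hs],
          pushStar_iterate_of_head_ne s (x :: settleL t) (by simp [hx])]
        simp

theorem pvSettle_eq_settleL (v : List String) : pvSettle v = settleL v := by
  have h : pvSettle v = finSettle (v.foldl stepSettle ([], 0, 0)) := rfl
  rw [h, pvSettle_invariant v [] 0 0]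
  simp

-- ---- 2D plumbing ----
theorem length_colOf (g : List (List String)) (c : Nat) : (colOf g c).length = g.length := by
  simp [colOf]

theorem length_wcol (c : Nat) (g : List (List String)) (u : List String) (h : u.length = g.length) :
    (wcol c g u).length = g.length := by
  simp [wcol, h]

theorem mem_wcol (c : Nat) (g : List (List String)) (u : List String) (row' : List String)
    (h : row' ∈ wcol c g u) : ∃ row ∈ g, ∃ x, row' = row.set c x := by
  induction g generalizing u with
  | nil => simp [wcol] at h
  | cons r g ih =>
    cases u with
    | nil => simp [wcol] at h
    | cons x u =>
      simp only [wcol, List.zipWith_cons_cons, List.mem_cons] at h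
      rcases h with h | h
      · exact ⟨r, by simp, x, h⟩
      · obtain ⟨row, hm, y, hy⟩ := ih u h
        exact ⟨row, List.mem_cons_of_mem _ hm, y, hy⟩

theorem wcol_colOf_self (c : Nat) (g : List (List String)) (hc : ∀ row ∈ g, c < row.length) :
    wcol c g (colOf g c) = g := by
  induction g with
  | nil => rfl
  | cons r g ih =>
    have hr : c < r.length := hc r (by simp)
    simp only [wcol, colOf, List.map_cons, List.zipWith_cons_cons]
    rw [show r.getD c "" = r[c] from List.getD_eq_getElem r "" hr, List.set_getElem_self]
    congr 1
    exact ih (fun row hm => hc row (List.mem_cons_of_mem _ hm))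

theorem colOf_wcol (c : Nat) (g : List (List String)) (u : List String)
    (hc : ∀ row ∈ g, c < row.length) (h : u.length = g.length) :
    colOf (wcol c g u) c = u := by
  induction g generalizing u with
  | nil => cases u with | nil => rfl | cons x u => simp at h
  | cons r g ih =>
    cases u with
    | nil => simp at h
    | cons x u =>
      have hr : c < r.length := hc r (by simp)
      simp only [wcol, colOf, List.zipWith_cons_cons, List.map_cons]
      congr 1
      · exact List.getD_eq_getElem _ "" (by simpa using hr) |>.trans (List.getElem_set_self _)
      · exact ih u (fun row hm => hc row (List.mem_cons_of_mem _ hm)) (by simpa using h)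

theorem wcol_wcol (c : Nat) (g : List (List String)) (u v : List String)
    (h : u.length = g.length) : wcol c (wcol c g u) v = wcol c g v := by
  induction g generalizing u v with
  | nil => simp [wcol]
  | cons r g ih =>
    cases u with
    | nil => simp at h
    | cons x u =>
      cases v with
      | nil => simp [wcol]
      | cons y v =>
        simp only [wcol, List.zipWith_cons_cons, List.set_set]
        congr 1
        exact ih u v (by simpa using h)

theorem setCell_eq_wcol (c : Nat) (g : List (List String)) (i : Nat) (v : String)
    (hc : ∀ row ∈ g, c < row.length) :
    g.set i ((g.getD i []).set c v) = wcol c g ((colOf g c).set i v) := by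
  induction g generalizing i with
  | nil => simp [wcol]
  | cons r g ih =>
    cases i with
    | zero =>
      simp only [List.getD_cons_zero, List.set_cons_zero, colOf, List.map_cons, wcol,
        List.zipWith_cons_cons]
      congr 1
      exact (wcol_colOf_self c g (fun row hm => hc row (List.mem_cons_of_mem _ hm))).symm
    | succ i =>
      simp only [List.getD_cons_succ, List.set_cons_succ, colOf, List.map_cons, wcol,
        List.zipWith_cons_cons]
      have hr : c < r.length := hc r (by simp)
      rw [show r.getD c "" = r[c] from List.getD_eq_getElem r "" hr, List.set_getElem_self]
      congr 1
      exact ih i (fun row hm => hc row (List.mem_cons_of_mem _ hm))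

theorem hc_wcol (c c' : Nat) (g : List (List String)) (u : List String)
    (hc : ∀ row ∈ g, c' < row.length) : ∀ row ∈ wcol c g u, c' < row.length := by
  intro row' hm
  obtain ⟨row, hrm, x, hx⟩ := mem_wcol c g u row' hm
  subst hx
  simpa using hc row hrm

-- pvCell at Nat indices reads the column
theorem pvCell_eq_colOf (g : List (List String)) (c i : Nat)
    (hc : ∀ row ∈ g, c < row.length) :
    pvCell g (i : Int) (c : Int) = (colOf g c)[i]? := by
  simp only [pvCell, PySem.List.pyGet?_natCast, colOf, List.getElem?_map]
  cases hgi : g[i]? with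
  | none => rfl
  | some row =>
    have hr : c < row.length := hc row (List.mem_of_getElem? hgi)
    simp [List.getElem?_eq_getElem hr]

-- the A-step at Nat indices, as a column operation
theorem pvDropOnce_eq_wcol (g : List (List String)) (c i : Nat)
    (hc : ∀ row ∈ g, c < row.length) :
    pvDropOnce g (c : Int) (i : Int) = wcol c g (swapN (colOf g c) i) := by
  have hcast : ((i : Int) + 1) = ((i + 1 : Nat) : Int) := by push_cast; ring
  simp only [pvDropOnce, hcast, pvCell_eq_colOf g c i hc, pvCell_eq_colOf g c (i + 1) hc, swapN]
  split
  · rename_i h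
    simp only [pvSetCell, PySem.List.pySetD_natCast, PySem.List.pyGetD_natCast]
    rw [setCell_eq_wcol c g i "." hc]
    have hc1 : ∀ row ∈ wcol c g ((colOf g c).set i "."), c < row.length :=
      hc_wcol c c g _ hc
    rw [setCell_eq_wcol c _ (i + 1) "*" hc1]
    rw [colOf_wcol c g ((colOf g c).set i ".") hc (by simp [length_colOf])]
    exact wcol_wcol c g _ _ (by simp [length_colOf])
  · exact (wcol_colOf_self c g hc).symm

theorem length_swapN (u : List String) (i : Nat) : (swapN u i).length = u.length := by
  simp only [swapN]; split <;> simp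

-- transporting an i-fold of A-steps to the column
theorem foldl_dropOnce_wcol (c : Nat) (g : List (List String))
    (hc : ∀ row ∈ g, c < row.length) :
    ∀ (l : List Nat) (u : List String), u.length = g.length →
      List.foldl (fun h (i : Nat) => pvDropOnce h (c : Int) (i : Int)) (wcol c g u) l
        = wcol c g (List.foldl swapN u l) := by
  intro l
  induction l with
  | nil => intro u _; rfl
  | cons i l ih =>
    intro u hu
    simp only [List.foldl_cons]
    have hc' : ∀ row ∈ wcol c g u, c < row.length := hc_wcol c c g u hc
    rw [pvDropOnce_eq_wcol (wcol c g u) c i hc', colOf_wcol c g u hc hu,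
      wcol_wcol c g u (swapN u i) hu]
    exact ih (swapN u i) (by rw [length_swapN]; exact hu)

theorem foldl_const_iterate {α : Type} (F : α → α) (a : α) (l : List Int) :
    List.foldl (fun x _ => F x) a l = F^[l.length] a := by
  induction l generalizing a with
  | nil => rfl
  | cons i l ih => simp [List.foldl_cons, ih, Function.iterate_succ_apply]

-- countdown ranges as reversed Nat ranges
theorem pyRange_countdown (n : Nat) :
    PySem.List.pyRange ((n : Int) - 1) (-1) (-1) = ((List.range n).reverse).map (fun (k : Nat) => (k : Int)) := by
  induction n with
  | zero => rw [PySem.List.pyRange_neg_one_eq_nil (by norm_num)]; rfl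
  | succ n ih =>
    rw [PySem.List.pyRange_neg_one_cons (by push_cast; omega)]
    have h1 : ((n + 1 : Nat) : Int) - 1 - 1 = (n : Int) - 1 := by push_cast; ring
    have h2 : ((n + 1 : Nat) : Int) - 1 = (n : Int) := by push_cast; ring
    rw [h1, h2, ih, List.range_succ]
    simp

-- the whole per-column A-loop (rows sweeps) settles the column
theorem acol_eq_wcol_settle (c : Nat) (g : List (List String)) (R : Nat)
    (hR : g.length = R) (hc : ∀ row ∈ g, c < row.length) :
    (PySem.List.pyRange ((R : Int) - 1) (-1) (-1)).foldl (fun h _r =>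
      (PySem.List.pyRange ((R : Int) - 2) (-1) (-1)).foldl (fun h' i => pvDropOnce h' (c : Int) i) h) g
    = wcol c g (settleL (colOf g c)) := by
  have hlen : (colOf g c).length = R := by rw [length_colOf, hR]
  -- the inner sweep, as a column operation
  have innerG : ∀ (h : List (List String)), h.length = R → (∀ row ∈ h, c < row.length) →
      (PySem.List.pyRange ((R : Int) - 2) (-1) (-1)).foldl (fun h' i => pvDropOnce h' (c : Int) i) h
        = wcol c h (passRec (colOf h c)) := by
    intro h hhR hch
    have base : ∀ u : List String, u.length = h.length →
        (PySem.List.pyRange ((R : Int) - 2) (-1) (-1)).foldl (fun h' i => pvDropOnce h' (c : Int) i) (wcol c h u)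
          = wcol c h (passRec u) := by
      intro u hu
      by_cases hR0 : R = 0
      · subst hR0
        rw [List.length_eq_zero_iff] at hhR
        subst hhR
        cases u with
        | nil =>
          rw [PySem.List.pyRange_neg_one_eq_nil (by norm_num)]
          rfl
        | cons a b => simp at hu
      · have hcd : ((R : Int) - 2) = ((R - 1 : Nat) : Int) - 1 := by omega
        rw [hcd, pyRange_countdown (R - 1), List.foldl_map,
          foldl_dropOnce_wcol c h hch ((List.range (R - 1)).reverse) u (by rw [hu])]
        have : u.length - 1 = R - 1 := by rw [hu, hhR]
        rw [← this, foldl_swapN_rev u]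
    conv_lhs => rw [← wcol_colOf_self c h hch]
    exact base (colOf h c) (by rw [length_colOf])
  rw [foldl_const_iterate _ g (PySem.List.pyRange ((R : Int) - 1) (-1) (-1))]
  have hlen2 : (PySem.List.pyRange ((R : Int) - 1) (-1) (-1)).length = R := by
    rw [pyRange_countdown R]; simp
  rw [hlen2]
  have main : ∀ (k : Nat) (u : List String), u.length = g.length →
      (fun h => (PySem.List.pyRange ((R : Int) - 2) (-1) (-1)).foldl
          (fun h' i => pvDropOnce h' (c : Int) i) h)^[k] (wcol c g u)
        = wcol c g (passRec^[k] u) := by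
    intro k
    induction k with
    | zero => intro u _; rfl
    | succ k ih =>
      intro u hu
      rw [Function.iterate_succ_apply]
      have hcg : ∀ row ∈ wcol c g u, c < row.length := hc_wcol c c g u hc
      have hwlen : (wcol c g u).length = R := by rw [length_wcol c g u hu, hR]
      show (fun h => _)^[k] ((PySem.List.pyRange ((R : Int) - 2) (-1) (-1)).foldl
          (fun h' i => pvDropOnce h' (c : Int) i) (wcol c g u)) = _
      rw [innerG (wcol c g u) hwlen hcg, colOf_wcol c g u hc hu,
        wcol_wcol c g u (passRec u) hu,
        ih (passRec u) (by rw [length_passRec]; exact hu),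
        ← Function.iterate_succ_apply]
  have := main R (colOf g c) (by rw [length_colOf])
  rw [wcol_colOf_self c g hc] at this
  rw [this, iterate_passRec_settle R (colOf g c) hlen]

-- write-back 1D: setting every position from u rebuilds u
theorem foldl_set_from : ∀ (u v : List String), v.length = u.length →
      List.foldl (fun w r => w.set r (u.getD r "")) v (List.range v.length) = u := by
  intro u
  induction u with
  | nil => intro v hv; simp only [List.length_nil, List.length_eq_zero_iff] at hv; subst hv; rfl
  | cons a u ih =>
    intro v hv
    cases v with
    | nil => simp at hv
    | cons b v =>
      simp only [List.length_cons, List.range_succ_eq_map, List.foldl_cons]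
      have h0 : (b :: v).set 0 ((a :: u).getD 0 "") = a :: v := by simp
      rw [h0,
        show List.map Nat.succ (List.range v.length) = (List.range v.length).map (· + 1) from
          List.map_congr_left (fun a _ => rfl),
        foldl_map_succ_cons (fun w r => w.set r ((a :: u).getD r ""))
          (fun w r => w.set r (u.getD r "")) (by intro w i x; simp) (List.range v.length) a v]
      congr 1
      have hvu : v.length = u.length := by simpa using hv
      exact hvu ▸ ih v hvu

-- the B column body as a column operation
theorem bcol_eq_wcol_settle (c : Nat) (g : List (List String))
    (hc : ∀ row ∈ g, c < row.length) :
    (PySem.List.pyRange 0 (g.length : Int) 1).foldl (fun g2 r =>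
        pvSetCell g2 r (c : Int) (PySem.List.pyGetD (pvSettle (g.map (fun row => PySem.List.pyGetD row (c : Int) ""))) r "")) g
    = wcol c g (settleL (colOf g c)) := by
  have hcol : g.map (fun row => PySem.List.pyGetD row (c : Int) "") = colOf g c := by
    simp [colOf, PySem.List.pyGetD_natCast]
  rw [hcol, pvSettle_eq_settleL]
  set u := settleL (colOf g c) with hu
  have hulen : u.length = g.length := by rw [hu, length_settleL, length_colOf]
  rw [PySem.List.pyRange_zero_natCast, List.foldl_map]
  -- transport to the column
  have trans : ∀ (l : List Nat) (w : List String), w.length = g.length →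
      List.foldl (fun g2 (r : Nat) => pvSetCell g2 (r : Int) (c : Int) (PySem.List.pyGetD u (r : Int) ""))
        (wcol c g w) l
      = wcol c g (List.foldl (fun w' r => w'.set r (u.getD r "")) w l) := by
    intro l
    induction l with
    | nil => intro w _; rfl
    | cons r l ih =>
      intro w hw
      simp only [List.foldl_cons]
      have hcg : ∀ row ∈ wcol c g w, c < row.length := hc_wcol c c g w hc
      have hstep : pvSetCell (wcol c g w) (r : Int) (c : Int) (PySem.List.pyGetD u (r : Int) "")
          = wcol c g (w.set r (u.getD r "")) := by
        simp only [pvSetCell, PySem.List.pySetD_natCast, PySem.List.pyGetD_natCast]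
        rw [setCell_eq_wcol c (wcol c g w) r _ hcg, colOf_wcol c g w hc hw,
          wcol_wcol c g w _ hw]
      rw [hstep]
      exact ih (w.set r (u.getD r "")) (by simp [hw])
  have hfin := trans (List.range g.length) (colOf g c) (by rw [length_colOf])
  rw [wcol_colOf_self c g hc] at hfin
  rw [hfin]
  have hrange : List.range g.length = List.range (colOf g c).length := by rw [length_colOf]
  rw [hrange, foldl_set_from u (colOf g c) (by rw [length_colOf, ← hulen])]

-- Good: shape invariant along the c-fold
def Good (R C : Nat) (g : List (List String)) : Prop :=
  g.length = R ∧ ∀ row ∈ g, C ≤ row.length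

theorem Good_wcol (R C : Nat) (c : Nat) (g : List (List String)) (u : List String)
    (hg : Good R C g) (hu : u.length = g.length) : Good R C (wcol c g u) := by
  refine ⟨by rw [length_wcol c g u hu]; exact hg.1, ?_⟩
  intro row' hm
  obtain ⟨row, hrm, x, hx⟩ := mem_wcol c g u row' hm
  subst hx
  simpa using hg.2 row hrm

theorem fold_cols_eq (R C : Nat) :
    ∀ (l : List Nat), (∀ k ∈ l, k < C) → ∀ (g : List (List String)), Good R C g →
      List.foldl (fun h cc =>
        (PySem.List.pyRange ((R : Int) - 1) (-1) (-1)).foldl (fun h' _r =>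
          (PySem.List.pyRange ((R : Int) - 2) (-1) (-1)).foldl (fun h'' i => pvDropOnce h'' cc i) h') h)
        g (l.map (fun (k : Nat) => (k : Int)))
      = List.foldl (fun h cc =>
          (PySem.List.pyRange 0 (h.length : Int) 1).foldl (fun g2 r =>
            pvSetCell g2 r cc (PySem.List.pyGetD (pvSettle (h.map (fun row => PySem.List.pyGetD row cc ""))) r "")) h)
          g (l.map (fun (k : Nat) => (k : Int))) := by
  intro l
  induction l with
  | nil => intro _ g _; rfl
  | cons k l ih =>
    intro hmem g hg
    have hk : k < C := hmem k (by simp)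
    have hc : ∀ row ∈ g, k < row.length := fun row hm => lt_of_lt_of_le hk (hg.2 row hm)
    simp only [List.map_cons, List.foldl_cons]
    rw [acol_eq_wcol_settle k g R hg.1 hc, bcol_eq_wcol_settle k g hc]
    exact ih (fun j hj => hmem j (by simp [hj]))
      (wcol k g (settleL (colOf g k)))
      (Good_wcol R C k g _ hg (by rw [length_settleL, length_colOf]))

-- ===== VERDICT (by name: the statement is the Claim_ definition above) =====
theorem simulate_fall_spec : Claim_equal_simulate_fall := by
  unfold Claim_equal_simulate_fall
  intro grid _hdom hpre
  obtain ⟨hne, hrows⟩ := hpre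
  simp only [Spec_simulate_fall, simulate_fall, simulate_fall_alt]
  set C : Nat := (grid.headD []).length with hC
  set R : Nat := grid.length with hR
  have hG : Good R C grid := ⟨rfl, hrows⟩
  rw [PySem.List.pyRange_zero_natCast C]
  exact fold_cols_eq R C (List.range C) (by intro k hk; simpa using hk) grid hG
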